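-- pv_equiv track=rewrite | github.com/gemmagordon/PLAbDab_nano | PLAbDab_nano/shark_number/number_shark.py | build_inward_list
-- ===== SOURCE A (Python) =====
-- def build_inward_list(length, start_num, end_num):
--     result = []
--     midpoint = length // 2  # Find the middle index by floor division
--     # 5 becomes 2 ensures that we start at the higher number if uneven
--     for i in range(midpoint):
--         result.append((str(start_num), chr(ord('A') + i)))
--     for i in range(midpoint, length):
--         if length % 2 != 0: # odd
--             result.append((str(end_num), chr(ord('A') + (midpoint*2-i))))
--         elif length % 2 == 0: # even
--             result.append((str(end_num), chr(ord('A') + (midpoint*2-(i+1)))))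
--     return result
-- ===== SOURCE B (Python) =====
-- def build_inward_list(length, start_num, end_num):
--     if length <= 0:
--         return []
--     s, e = str(start_num), str(end_num)
--     half = length // 2
--     left = [chr(ord('A') + i) for i in range(half)]
--     middle = [chr(ord('A') + half)] if length % 2 else []
--     return [(s, c) for c in left] + [(e, c) for c in middle + left[::-1]]
-- ===== Notes on version B (the rewrite author's own statement) =====
-- stated objective: simpler
-- what changed: B builds the left letter block once, then forms the right half by list reversal of that block (plus an optional middle letter) and pairs the halves with the precomputed number strings, instead of A's two index-arithmetic loops with an inner parity branch recomputing each mirrored chr code.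
-- outside the precondition, e.g. on build_inward_list(2228095, 0, 0): A raises ValueError, B raises ValueError
import Mathlib
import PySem

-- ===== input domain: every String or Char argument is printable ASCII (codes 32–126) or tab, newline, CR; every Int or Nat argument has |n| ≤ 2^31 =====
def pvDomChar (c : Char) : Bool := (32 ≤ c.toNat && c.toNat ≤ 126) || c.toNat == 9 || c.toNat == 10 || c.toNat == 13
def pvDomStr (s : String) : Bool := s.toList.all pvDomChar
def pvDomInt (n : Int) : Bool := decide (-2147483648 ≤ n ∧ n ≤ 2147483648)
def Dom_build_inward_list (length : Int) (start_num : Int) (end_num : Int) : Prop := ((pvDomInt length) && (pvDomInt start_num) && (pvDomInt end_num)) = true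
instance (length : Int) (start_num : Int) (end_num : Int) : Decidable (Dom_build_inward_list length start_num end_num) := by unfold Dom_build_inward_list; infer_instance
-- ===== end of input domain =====

-- B builds the left letter block once and obtains the right block as its list REVERSAL
-- (plus an optional middle letter), instead of A's two index-arithmetic loops: objective 'simpler'.

-- chr(n) as a one-character string: exact for 0 ≤ n < 0xD800 (Pre_ keeps all codes in 65..0xD7FF)
def pvChr (n : Int) : String := String.mk [Char.ofNat n.toNat]

-- ===== PORT A =====
def build_inward_list (length : Int) (start_num : Int) (end_num : Int) : List (String × String) :=
  let midpoint := PySem.Int.floordiv length 2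
  let result : List (String × String) :=
    (PySem.List.pyRange 0 midpoint 1).foldl
      (fun r i => r ++ [(PySem.Int.toStr start_num, pvChr (65 + i))]) []
  (PySem.List.pyRange midpoint length 1).foldl
    (fun r i =>
      if PySem.Int.mod length 2 ≠ 0 then
        r ++ [(PySem.Int.toStr end_num, pvChr (65 + (midpoint * 2 - i)))]
      else if PySem.Int.mod length 2 = 0 then
        r ++ [(PySem.Int.toStr end_num, pvChr (65 + (midpoint * 2 - (i + 1))))]
      else r) result

-- ===== PORT B =====
def build_inward_list_alt (length : Int) (start_num : Int) (end_num : Int) : List (String × String) :=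
  if length ≤ 0 then []
  else
    let s := PySem.Int.toStr start_num
    let e := PySem.Int.toStr end_num
    let half := PySem.Int.floordiv length 2
    let left := (PySem.List.pyRange 0 half 1).map (fun i => pvChr (65 + i))
    let middle := if PySem.Int.mod length 2 ≠ 0 then [pvChr (65 + half)] else []
    left.map (fun c => (s, c)) ++ (middle ++ left.reverse).map (fun c => (e, c))

-- ===== PRECONDITION & SPEC =====
-- Pre_ excludes lengths > 110462: there A's (and B's) returned pairs contain lone UTF-16
-- surrogate code points chr(n), n ≥ 0xD800 — Python strings with no counterpart in the port's
-- String type (Unicode scalar values), so A's value leaves the declared type; B returns the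
-- identical value there in Python (and for length ≥ 2228095 both raise ValueError).
def Pre_build_inward_list (length : Int) (start_num : Int) (end_num : Int) : Prop :=
  length ≤ 110462
instance (length : Int) (start_num : Int) (end_num : Int) : Decidable (Pre_build_inward_list length start_num end_num) := by unfold Pre_build_inward_list; infer_instance

def pvWitness_build_inward_list : Int × Int × Int := (5, 3, 9)

def Spec_build_inward_list (length : Int) (start_num : Int) (end_num : Int) (out : List (String × String)) : Prop := out = build_inward_list_alt length start_num end_num
instance (length : Int) (start_num : Int) (end_num : Int) (out : List (String × String)) : Decidable (Spec_build_inward_list length start_num end_num out) := by unfold Spec_build_inward_list; infer_instance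

-- ===== CLAIM (what is proved, stated in full; the proofs are below) =====
def Claim_equal_build_inward_list : Prop := ∀ (length : Int) (start_num : Int) (end_num : Int), Dom_build_inward_list length start_num end_num → Pre_build_inward_list length start_num end_num → Spec_build_inward_list length start_num end_num (build_inward_list length start_num end_num)

-- ===== LEMMAS AND PROOFS =====

-- A map over range(a,b) of a countdown argument c - i is the reverse of the map over the shifted range.
-- A map over range(a,b) of a countdown argument c - i is the reverse of the map over the shifted range.
theorem map_range_sub_reverse {α : Type} (a b c : Int) (g : Int → α) :
    (PySem.List.pyRange a b 1).map (fun i => g (c - i)) =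
      ((PySem.List.pyRange (c - b + 1) (c - a + 1) 1).map g).reverse := by
  apply List.ext_getElem
  · simp [PySem.List.length_pyRange_one]
  · intro k h1 h2
    simp only [List.length_map, PySem.List.length_pyRange_one] at h1 h2
    simp only [List.getElem_map, List.getElem_reverse, List.length_map,
      PySem.List.length_pyRange_one, PySem.List.getElem_pyRange_one]
    congr 1
    omega

theorem build_inward_eq (length start_num end_num : Int) :
    build_inward_list length start_num end_num = build_inward_list_alt length start_num end_num := by
  unfold build_inward_list build_inward_list_alt
  simp only []
  set mid := PySem.Int.floordiv length 2 with hmid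
  have hdm := PySem.Int.floordiv_mul_add_mod length 2
  have hm2 := PySem.Int.mod_two_eq length
  rcases (by omega : length ≤ 0 ∨ 0 < length) with hl | hl
  · rw [if_pos hl]
    have h1 : mid ≤ 0 := by omega
    have h2 : length ≤ mid := by omega
    rw [PySem.List.pyRange_one_eq_nil h1, PySem.List.pyRange_one_eq_nil h2]
    simp
  · rw [if_neg (by omega)]
    have h0m : (0:Int) ≤ mid := by omega
    have hml : mid ≤ length := by omega
    rcases hm2 with hm | hm
    · -- even length: midpoint*2 - (i+1) = (length - 1) - i, and no middle letter
      simp only [hm, ne_eq, not_true_eq_false, reduceIte, List.nil_append]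
      simp only [PySem.List.foldl_append_singleton_eq_map, List.nil_append]
      congr 1
      · rw [List.map_map]; rfl
      · rw [List.map_reverse, List.map_map]
        have harg : ((PySem.List.pyRange mid length 1).map fun i =>
            (PySem.Int.toStr end_num, pvChr (65 + (mid * 2 - (i + 1))))) =
            (PySem.List.pyRange mid length 1).map fun i =>
              (fun j => (PySem.Int.toStr end_num, pvChr (65 + j))) ((length - 1) - i) := by
          apply List.map_congr_left
          intro i _
          simp only []
          congr 2
          omega
        rw [harg, map_range_sub_reverse mid length (length - 1)
              (fun j => (PySem.Int.toStr end_num, pvChr (65 + j)))]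
        rw [show length - 1 - length + 1 = (0:Int) by ring,
            show length - 1 - mid + 1 = mid by omega]
        rfl
    · -- odd length: midpoint*2 - i = (length - 1) - i, middle letter chr(65 + mid)
      simp only [hm, ne_eq, one_ne_zero, not_false_eq_true, reduceIte, List.singleton_append]
      simp only [PySem.List.foldl_append_singleton_eq_map, List.nil_append]
      congr 1
      · rw [List.map_map]; rfl
      · rw [List.map_cons, List.map_reverse, List.map_map]
        have harg : ((PySem.List.pyRange mid length 1).map fun i =>
            (PySem.Int.toStr end_num, pvChr (65 + (mid * 2 - i)))) =
            (PySem.List.pyRange mid length 1).map fun i =>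
              (fun j => (PySem.Int.toStr end_num, pvChr (65 + j))) ((length - 1) - i) := by
          apply List.map_congr_left
          intro i _
          simp only []
          congr 2
          omega
        rw [harg, map_range_sub_reverse mid length (length - 1)
              (fun j => (PySem.Int.toStr end_num, pvChr (65 + j)))]
        rw [show length - 1 - length + 1 = 0 by ring,
            show length - 1 - mid + 1 = mid + 1 by omega,
            PySem.List.pyRange_one_succ_right (by omega : (0:Int) ≤ mid),
            List.map_append, List.reverse_append]
        simp

-- ===== VERDICT (by name: the statement is the Claim_ definition above) =====
theorem build_inward_list_spec : Claim_equal_build_inward_list := by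
  intro length start_num end_num _ _
  unfold Spec_build_inward_list
  exact build_inward_eq length start_num end_num
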